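-- pv_equiv track=rewrite | github.com/arjaygg/supervisor-coding-agent | supervisor_agent/core/conflict_resolver.py | _determine_implementation_order
-- ===== SOURCE A (Python) =====
-- from typing import Any, Dict, List, NamedTuple, Optional, Set, Tuple, Union
--
-- def _determine_implementation_order(
--     actions: List[Dict[str, Any]]
-- ) -> List[str]:
--     """Determine optimal order for implementing actions."""
--     # Priority order for action types
--     priority_order = {
--         "scale_up": 1,
--         "create_priority_queue": 2,
--         "migrate_task": 3,
--         "set_fair_share": 4,
--         "preempt_pause": 5,
--         "preempt_reduce": 6,
--     }
--
--     # Sort actions by priority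
--     sorted_actions = sorted(
--         actions, key=lambda a: priority_order.get(a.get("type", ""), 999)
--     )
--
--     return [
--         action.get("type", f"action_{i}") for i, action in enumerate(sorted_actions)
--     ]
-- ===== SOURCE B (Python) =====
-- def _determine_implementation_order(actions):
--     """Bucket actions by their fixed priority (counting sort) instead of sorted()."""
--     priority_order = {
--         "scale_up": 1,
--         "create_priority_queue": 2,
--         "migrate_task": 3,
--         "set_fair_share": 4,
--         "preempt_pause": 5,
--         "preempt_reduce": 6,
--     }
--     priorities = (1, 2, 3, 4, 5, 6, 999)
--     buckets = {p: [] for p in priorities}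
--     for action in actions:
--         buckets[priority_order.get(action.get("type", ""), 999)].append(action)
--     result = []
--     i = 0
--     for p in priorities:
--         for action in buckets[p]:
--             result.append(action.get("type", f"action_{i}"))
--             i += 1
--     return result
-- ===== Notes on version B (the rewrite author's own statement) =====
-- stated objective: alternative
-- what changed: Replaces the comparison sort with a single-pass counting/bucket sort over the fixed priority domain {1..6,999}: each action is appended to its priority's bucket and the buckets are concatenated in ascending priority order (stable by construction), then the type list is built from the concatenation.
import Mathlib
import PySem

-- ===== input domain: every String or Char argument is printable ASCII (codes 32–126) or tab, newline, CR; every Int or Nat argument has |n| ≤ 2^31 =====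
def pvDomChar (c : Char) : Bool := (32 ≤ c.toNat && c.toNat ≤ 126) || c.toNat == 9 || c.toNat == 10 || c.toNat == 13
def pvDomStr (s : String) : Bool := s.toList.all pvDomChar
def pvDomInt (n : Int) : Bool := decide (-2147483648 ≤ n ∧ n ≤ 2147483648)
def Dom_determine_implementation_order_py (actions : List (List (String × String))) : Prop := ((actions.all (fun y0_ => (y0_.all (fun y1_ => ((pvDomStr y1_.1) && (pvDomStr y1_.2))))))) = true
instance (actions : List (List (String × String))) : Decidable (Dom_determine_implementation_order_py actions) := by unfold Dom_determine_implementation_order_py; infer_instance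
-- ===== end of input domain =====

-- B replaces sorted() by a stable bucket (counting) sort over the fixed priority domain {1..6, 999}; alternative decomposition, same results.


-- ===== PORT A =====
-- the 'priority_order' dict literal of A
def pvPrioA : PySem.Dict String Int :=
  PySem.Dict.mk [("scale_up", 1), ("create_priority_queue", 2), ("migrate_task", 3),
                 ("set_fair_share", 4), ("preempt_pause", 5), ("preempt_reduce", 6)]

-- the sort key lambda:  priority_order.get(a.get("type", ""), 999)
def pvKeyA (a : List (String × String)) : Int :=
  pvPrioA.getD ((PySem.Dict.mk a).getD "type" "") 999

def determine_implementation_order_py (actions : List (List (String × String))) : List String :=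
  let sorted_actions := PySem.List.sorted actions pvKeyA false
  (PySem.List.enumerate sorted_actions 0).map
    (fun p => (PySem.Dict.mk p.2).getD "type" ("action_" ++ PySem.Int.toStr p.1))

-- ===== PORT B =====
-- B's own copy of the 'priority_order' dict literal
def pvPrioB : PySem.Dict String Int :=
  PySem.Dict.mk [("scale_up", 1), ("create_priority_queue", 2), ("migrate_task", 3),
                 ("set_fair_share", 4), ("preempt_pause", 5), ("preempt_reduce", 6)]

def pvKeyB (a : List (String × String)) : Int :=
  pvPrioB.getD ((PySem.Dict.mk a).getD "type" "") 999

-- the 'priorities' tuple (1, 2, 3, 4, 5, 6, 999)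
def pvPriorities : List Int := [1, 2, 3, 4, 5, 6, 999]

def determine_implementation_order_py_alt (actions : List (List (String × String))) : List String :=
  -- buckets = {p: [] for p in priorities}
  let buckets0 : PySem.Dict Int (List (List (String × String))) :=
    pvPriorities.foldl (fun d p => d.insert p []) PySem.Dict.empty
  -- for action in actions: buckets[key(action)].append(action)
  -- (the key is always present, so d[k].append(x) is modify k with append; default [] is never used)
  let buckets := actions.foldl (fun d a => d.modify (pvKeyB a) [] (· ++ [a])) buckets0
  -- for p in priorities: for action in buckets[p]: result.append(...); i += 1
  let final := pvPriorities.foldl (fun st p =>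
      (buckets.getD p []).foldl (fun st a =>
        (st.1 ++ [(PySem.Dict.mk a).getD "type" ("action_" ++ PySem.Int.toStr st.2)], st.2 + 1)) st)
    ([], 0)
  final.1

-- ===== PRECONDITION & SPEC =====
def Spec_determine_implementation_order_py (actions : List (List (String × String))) (out : List String) : Prop := out = determine_implementation_order_py_alt actions
instance (actions : List (List (String × String))) (out : List String) : Decidable (Spec_determine_implementation_order_py actions out) := by unfold Spec_determine_implementation_order_py; infer_instance

-- ===== CLAIM (what is proved, stated in full; the proofs are below) =====
def Claim_equal_determine_implementation_order_py : Prop := ∀ (actions : List (List (String × String))), Dom_determine_implementation_order_py actions → Spec_determine_implementation_order_py actions (determine_implementation_order_py actions)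

-- ===== LEMMAS AND PROOFS =====

-- the two copies of the key function agree
theorem pvKey_eq (a : List (String × String)) : pvKeyB a = pvKeyA a := rfl

-- the key only takes the seven bucket values
theorem pvKeyA_mem (a : List (String × String)) : pvKeyA a ∈ pvPriorities := by
  simp only [pvKeyA, pvPrioA, PySem.Dict.getD, PySem.Dict.get?_mk_cons, pvPriorities]
  split_ifs <;> simp [PySem.Dict.get?]

-- insertBy walks past a prefix it is not inserted into
theorem pv_insertBy_append_left {α : Type} (before : α → α → Bool) (x : α) (l r : List α)
    (h : ∀ b ∈ l, before x b = false) :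
    PySem.List.insertBy before x (l ++ r) = l ++ PySem.List.insertBy before x r := by
  induction l with
  | nil => simp
  | cons b t ih =>
      have hb : before x b = false := h b (by simp)
      simp only [List.cons_append, PySem.List.insertBy, hb]
      simp only [Bool.false_eq_true, if_false, List.cons.injEq, true_and]
      exact ih (fun c hc => h c (by simp [hc]))

-- insertBy puts x in front when it goes before the head (or the list is empty)
theorem pv_insertBy_front {α : Type} (before : α → α → Bool) (x : α) (r : List α)
    (h : ∀ y ∈ r, before x y = true) :
    PySem.List.insertBy before x r = x :: r := by
  cases r with
  | nil => rfl
  | cons y t => simp [PySem.List.insertBy, h y (by simp)]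

-- inserting one element into the bucket decomposition appends it to its bucket
theorem pv_step {α : Type} (key : α → Int) (vs : List Int) (hvs : vs.Pairwise (· < ·))
    (p : List α) (x : α) (hx : key x ∈ vs) :
    PySem.List.insertBy (fun a b => decide (key a < key b)) x
        ((vs.map (fun v => p.filter (fun a => key a == v))).flatten)
      = (vs.map (fun v => (p ++ [x]).filter (fun a => key a == v))).flatten := by
  induction vs with
  | nil => simp at hx
  | cons v vs' ih =>
      have hlt : ∀ v' ∈ vs', v < v' := (List.pairwise_cons.mp hvs).1
      have hvs' : vs'.Pairwise (· < ·) := (List.pairwise_cons.mp hvs).2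
      by_cases hxv : key x = v
      · -- x lands in the head bucket; the remaining buckets are unchanged
        have hrest : ∀ y ∈ (vs'.map (fun v => p.filter (fun a => key a == v))).flatten,
            decide (key x < key y) = true := by
          intro y hy
          rcases List.mem_flatten.mp hy with ⟨b, hb, hyb⟩
          rcases List.mem_map.mp hb with ⟨v', hv', rfl⟩
          have : key y = v' := by simpa using (List.mem_filter.mp hyb).2
          simp [hxv, this, hlt v' hv']
        have hpre : ∀ b ∈ p.filter (fun a => key a == v),
            (fun a b => decide (key a < key b)) x b = false := by
          intro b hb
          have : key b = v := by simpa using (List.mem_filter.mp hb).2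
          simp [hxv, this]
        simp only [List.map_cons, List.flatten_cons]
        rw [pv_insertBy_append_left _ _ _ _ hpre, pv_insertBy_front _ _ _ hrest]
        have hne : ∀ v' ∈ vs', (p ++ [x]).filter (fun a => key a == v')
            = p.filter (fun a => key a == v') := by
          intro v' hv'
          have hvv' := hlt v' hv'
          have : ¬ (key x = v') := by intro h2; omega
          simp [List.filter_append, this]
        have hmape : vs'.map (fun v' => (p ++ [x]).filter (fun a => key a == v'))
            = vs'.map (fun v' => p.filter (fun a => key a == v')) :=
          List.map_congr_left hne
        rw [hmape]
        simp [List.filter_append, hxv]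
      · -- x lands in a later bucket
        have hx' : key x ∈ vs' := by
          rcases List.mem_cons.mp hx with h | h
          · exact absurd h hxv
          · exact h
        have hpre : ∀ b ∈ p.filter (fun a => key a == v),
            (fun a b => decide (key a < key b)) x b = false := by
          intro b hb
          have hbv : key b = v := by simpa using (List.mem_filter.mp hb).2
          have : v < key x := hlt _ hx'
          simp [hbv]; omega
        simp only [List.map_cons, List.flatten_cons]
        rw [pv_insertBy_append_left _ _ _ _ hpre, ih hvs' hx']
        simp [List.filter_append, hxv]

-- the stable sort is the bucket decomposition (invariant form)
theorem pv_sorted_aux {α : Type} (key : α → Int) (vs : List Int) (hvs : vs.Pairwise (· < ·))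
    (xs : List α) (hxs : ∀ a ∈ xs, key a ∈ vs) : ∀ p : List α,
    xs.foldl (fun acc x => PySem.List.insertBy (fun a b => decide (key a < key b)) x acc)
        ((vs.map (fun v => p.filter (fun a => key a == v))).flatten)
      = (vs.map (fun v => (p ++ xs).filter (fun a => key a == v))).flatten := by
  induction xs with
  | nil => intro p; simp
  | cons x t ih =>
      intro p
      have hx : key x ∈ vs := hxs x (by simp)
      have ht : ∀ a ∈ t, key a ∈ vs := fun a ha => hxs a (by simp [ha])
      simp only [List.foldl_cons]
      rw [pv_step key vs hvs p x hx, ih ht (p ++ [x])]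
      simp

theorem pv_sorted_eq_buckets {α : Type} (key : α → Int) (vs : List Int)
    (hvs : vs.Pairwise (· < ·)) (xs : List α) (hxs : ∀ a ∈ xs, key a ∈ vs) :
    PySem.List.sorted xs key false
      = (vs.map (fun v => xs.filter (fun a => key a == v))).flatten := by
  rw [PySem.List.sorted_eq_foldl_insertBy]
  have := pv_sorted_aux key vs hvs xs hxs []
  simpa using this

-- the comprehension body shared by both ports
def pvG (p : Int × List (String × String)) : String :=
  (PySem.Dict.mk p.2).getD "type" ("action_" ++ PySem.Int.toStr p.1)

-- B's inner loop emits the enumeration of its bucket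
theorem pv_inner (l : List (List (String × String))) : ∀ (out : List String) (i : Int),
    l.foldl (fun st a => (st.1 ++ [pvG (st.2, a)], st.2 + 1)) (out, i)
      = (out ++ (PySem.List.enumerate l i).map pvG, i + l.length) := by
  induction l with
  | nil => intro out i; simp [PySem.List.enumerate]
  | cons a t ih =>
      intro out i
      simp only [List.foldl_cons]
      rw [ih]
      refine Prod.ext ?_ (by simp; omega)
      simp [PySem.List.enumerate]

-- B's outer loop over the priority values emits the enumeration of the concatenated buckets
theorem pv_outer (vs : List Int) (F : Int → List (List (String × String))) :
    ∀ (out : List String) (i : Int),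
    vs.foldl (fun st p =>
        (F p).foldl (fun st a => (st.1 ++ [pvG (st.2, a)], st.2 + 1)) st) (out, i)
      = (out ++ (PySem.List.enumerate (vs.map F).flatten i).map pvG,
         i + (vs.map F).flatten.length) := by
  induction vs with
  | nil => intro out i; simp
  | cons v t ih =>
      intro out i
      simp only [List.foldl_cons]
      rw [pv_inner, ih]
      rw [List.map_cons, List.flatten_cons, PySem.List.enumerate_append]
      refine Prod.ext (by simp) (by simp; omega)

-- the bucket dict built by B's first loop holds exactly the key-filtered sublists
theorem pv_buckets_getD (actions : List (List (String × String))) (v : Int)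
    (hv : v ∈ pvPriorities) :
    (actions.foldl (fun d a => d.modify (pvKeyB a) [] (· ++ [a]))
        (pvPriorities.foldl (fun d p => d.insert p []) PySem.Dict.empty)).getD v []
      = actions.filter (fun a => pvKeyB a == v) := by
  have h1 : actions.foldl (fun d a => d.modify (pvKeyB a) [] (· ++ [a]))
        (pvPriorities.foldl (fun d p => d.insert p []) PySem.Dict.empty)
      = (actions.map (fun a => (pvKeyB a, a))).foldl (fun d p => d.modify p.1 [] (· ++ [p.2]))
        (pvPriorities.foldl (fun d p => d.insert p []) PySem.Dict.empty) := by
    rw [List.foldl_map]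
  rw [h1, PySem.Dict.getD_foldl_modify_append]
  have h0 : (pvPriorities.foldl (fun d p => d.insert p []) PySem.Dict.empty).getD v
      ([] : List (List (String × String))) = [] := by
    fin_cases hv <;> rfl
  rw [h0, List.filter_map, List.map_map]
  simp [Function.comp_def]

-- ===== VERDICT (by name: the statement is the Claim_ definition above) =====
theorem determine_implementation_order_py_spec : Claim_equal_determine_implementation_order_py := by
  intro actions _
  unfold Spec_determine_implementation_order_py
  unfold determine_implementation_order_py determine_implementation_order_py_alt
  simp only []
  have hvs : pvPriorities.Pairwise (· < ·) := by decide
  have hsort := pv_sorted_eq_buckets pvKeyA pvPriorities hvs actions (fun a _ => pvKeyA_mem a)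
  have hbuck : ∀ v ∈ pvPriorities,
      (actions.foldl (fun d a => d.modify (pvKeyB a) [] (· ++ [a]))
          (pvPriorities.foldl (fun d p => d.insert p []) PySem.Dict.empty)).getD v []
        = actions.filter (fun a => pvKeyA a == v) := by
    intro v hv
    rw [pv_buckets_getD actions v hv]
    simp [pvKey_eq]
  -- rewrite both sides into the shared comprehension body pvG
  show (PySem.List.enumerate (PySem.List.sorted actions pvKeyA false) 0).map pvG
      = (pvPriorities.foldl (fun st p =>
          ((actions.foldl (fun d a => d.modify (pvKeyB a) [] (· ++ [a]))
              (pvPriorities.foldl (fun d p => d.insert p []) PySem.Dict.empty)).getD p []).foldl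
            (fun st a => (st.1 ++ [pvG (st.2, a)], st.2 + 1)) st) ([], 0)).1
  rw [PySem.List.foldl_congr_mem pvPriorities _
        (fun st p => (actions.filter (fun a => pvKeyA a == p)).foldl
          (fun st a => (st.1 ++ [pvG (st.2, a)], st.2 + 1)) st) _
        (fun st p hp => by rw [hbuck p hp])]
  rw [pv_outer pvPriorities (fun v => actions.filter (fun a => pvKeyA a == v)), hsort]
  simp
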